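-- pv_equiv track=rewrite | github.com/pedro-maschio/ComputationalSecurity | Trabalho1/Trabalho1.py | find_matchings
-- ===== SOURCE A (Python) =====
-- def find_matchings(cipherText):
--     matching_numbers = []
--
--     for i in range(1, len(cipherText)):
--         match_count = 0
--         temp = i
--         for j in range(len(cipherText)):
--             if cipherText[j] == cipherText[temp]:
--                 match_count += 1
--             temp += 1
--             if temp >= len(cipherText):
--                 break
--         matching_numbers.append(match_count)
--
--     return matching_numbers
-- ===== SOURCE B (Python) =====
-- def _pair_diffs(ps):
--     # all differences q - p over pairs p < q of the (increasing) position list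
--     out = []
--     rest = ps
--     while rest:
--         head = rest[0]
--         rest = rest[1:]
--         for q in rest:
--             out.append(q - head)
--     return out
--
--
-- def find_matchings(cipherText):
--     n = len(cipherText)
--     positions = {}
--     for idx, ch in enumerate(cipherText):
--         positions.setdefault(ch, []).append(idx)
--     counts = [0] * n
--     for ps in positions.values():
--         for d in _pair_diffs(ps):
--             counts[d] += 1
--     return counts[1:]
-- ===== Notes on version B (the rewrite author's own statement) =====
-- stated objective: alternative
-- what changed: Instead of re-scanning the whole string for every shift, B groups character positions into a dict in one pass and histograms the pairwise position differences within each equal-character group, returning the histogram slice counts[1:].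
import Mathlib
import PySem

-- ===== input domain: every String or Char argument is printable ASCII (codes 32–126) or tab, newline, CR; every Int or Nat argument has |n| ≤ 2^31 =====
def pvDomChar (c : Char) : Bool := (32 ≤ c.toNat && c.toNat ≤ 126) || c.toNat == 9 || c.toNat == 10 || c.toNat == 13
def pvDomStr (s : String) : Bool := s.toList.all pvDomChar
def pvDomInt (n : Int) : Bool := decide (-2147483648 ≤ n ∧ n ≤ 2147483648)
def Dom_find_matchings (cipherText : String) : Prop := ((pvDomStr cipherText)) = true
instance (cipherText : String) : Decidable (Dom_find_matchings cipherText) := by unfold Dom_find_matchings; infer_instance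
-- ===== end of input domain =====

-- B groups positions per character in a dict and histograms pairwise position differences
-- within each group, instead of A's per-shift rescan of the whole string (alternative algorithm).


-- ===== PORT A =====
-- A's inner loop: 'for j in range(len(cipherText)): … ; temp += 1; if temp >= len(...): break'
def innerA (cs : List Char) (n : Int) (temp j count : Int) : Int :=
  if _h : j < n then
    let count' := if PySem.List.pyGet? cs j = PySem.List.pyGet? cs temp then count + 1 else count
    let temp' := temp + 1
    if temp' ≥ n then count' else innerA cs n temp' (j + 1) count'
  else count
termination_by (n - j).toNat
decreasing_by simp_wf; omega

def find_matchings (cipherText : String) : List Int :=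
  let cs := cipherText.toList
  let n : Int := PySem.Str.len cipherText
  (PySem.List.pyRange 1 n 1).foldl (fun acc i => acc ++ [innerA cs n i 0 0]) []

-- ===== PORT B =====
-- Source B's _pair_diffs: 'while rest: head, rest = rest[0], rest[1:]; for q in rest: out.append(q - head)'
def pairDiffs (out : List Int) : List Int → List Int
  | [] => out
  | head :: rest => pairDiffs (rest.foldl (fun o q => o ++ [q - head]) out) rest

def find_matchings_alt (cipherText : String) : List Int :=
  let cs := cipherText.toList
  let n : Int := PySem.Str.len cipherText
  let positions : PySem.Dict Char (List Int) :=
    (PySem.List.enumerate cs 0).foldl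
      (fun d p => d.modify p.2 [] (fun l => l ++ [p.1])) PySem.Dict.empty
  let counts : List Int :=
    positions.values.foldl (fun c ps =>
      (pairDiffs [] ps).foldl
        (fun c d => PySem.List.pySetD c d (PySem.List.pyGetD c d 0 + 1)) c)
      (PySem.List.pyRepeat [0] n)
  PySem.List.slice counts (some 1) none

-- ===== PRECONDITION & SPEC =====
def Spec_find_matchings (cipherText : String) (out : List Int) : Prop := out = find_matchings_alt cipherText
instance (cipherText : String) (out : List Int) : Decidable (Spec_find_matchings cipherText out) := by unfold Spec_find_matchings; infer_instance

-- ===== CLAIM (what is proved, stated in full; the proofs are below) =====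
def Claim_equal_find_matchings : Prop := ∀ (cipherText : String), Dom_find_matchings cipherText → Spec_find_matchings cipherText (find_matchings cipherText)

-- ===== LEMMAS AND PROOFS =====

def cnt (cs : List Char) (jl t m : Nat) : Nat :=
  (List.range m).countP (fun r => decide (cs[jl + r]? = cs[t + r]?))

def diffsRec : List Int → List Int
  | [] => []
  | x :: xs => xs.map (· - x) ++ diffsRec xs

def posL (cs : List Char) (c : Char) : List Int :=
  ((List.range cs.length).filter (fun j => cs.getD j default == c)).map (fun j : Nat => (j : Int))

lemma cnt_succ (cs : List Char) (jl t m : Nat) :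
    cnt cs jl t (m + 1) =
      (if cs[jl]? = cs[t]? then 1 else 0) + cnt cs (jl + 1) (t + 1) m := by
  unfold cnt
  rw [List.range_succ_eq_map]
  simp [List.countP_cons, List.countP_map, Function.comp_def, Nat.add_comm, Nat.add_left_comm]

lemma pairDiffs_eq : ∀ (ps out : List Int), pairDiffs out ps = out ++ diffsRec ps := by
  intro ps
  induction ps with
  | nil => intro out; simp [pairDiffs, diffsRec]
  | cons x xs ih =>
      intro out
      rw [pairDiffs, ih, PySem.List.foldl_append_singleton_eq_map]
      simp [diffsRec]

lemma posL_pairwise (cs : List Char) (c : Char) : (posL cs c).Pairwise (· < ·) := by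
  unfold posL
  have h1 : ((List.range cs.length).filter (fun j => cs.getD j default == c)).Pairwise (· < ·) :=
    List.Pairwise.filter _ List.pairwise_lt_range
  exact List.pairwise_map.mpr (h1.imp (fun {a b} h => by exact_mod_cast h))

lemma mem_posL (cs : List Char) (c : Char) (p : Int) :
    p ∈ posL cs c ↔ ∃ j : Nat, j < cs.length ∧ cs.getD j default = c ∧ p = (j : Int) := by
  unfold posL
  simp [List.mem_filter, List.mem_range]
  constructor
  · rintro ⟨j, ⟨hj, hc⟩, rfl⟩; exact ⟨j, hj, hc, rfl⟩
  · rintro ⟨j, hj, hc, rfl⟩; exact ⟨j, ⟨hj, hc⟩, rfl⟩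

lemma innerA_inv (cs : List Char) :
    ∀ (m jl t : Nat) (c : Int), t + m = cs.length → 1 ≤ m → jl ≤ t →
      innerA cs (cs.length : Int) (t : Int) (jl : Int) c = c + cnt cs jl t m := by
  intro m
  induction m with
  | zero => omega
  | succ m ih =>
      intro jl t c hlen _ hjt
      rw [innerA]
      have hj : (jl : Int) < (cs.length : Int) := by omega
      rw [dif_pos hj]
      simp only [PySem.List.pyGet?_natCast]
      by_cases hm : m = 0
      · subst hm
        have ht' : (t : Int) + 1 ≥ (cs.length : Int) := by omega
        rw [if_pos ht']
        have : cnt cs jl t 1 = if cs[jl]? = cs[t]? then 1 else 0 := by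
          simp [cnt, List.countP_cons]
        rw [this]
        split_ifs <;> simp
      · have ht' : ¬ ((t : Int) + 1 ≥ (cs.length : Int)) := by omega
        rw [if_neg ht']
        have h1 : ((t : Int) + 1) = ((t + 1 : Nat) : Int) := by push_cast; ring
        have h2 : ((jl : Int) + 1) = ((jl + 1 : Nat) : Int) := by push_cast; ring
        rw [h1, h2, ih (jl + 1) (t + 1) _ (by omega) (by omega) (by omega)]
        rw [cnt_succ]
        split_ifs <;> push_cast <;> ring

lemma A_eq (s : String) :
    find_matchings s =
      (List.range (s.toList.length - 1)).map
        (fun k => ((cnt s.toList 0 (k + 1) (s.toList.length - (k + 1)) : Nat) : Int)) := by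
  unfold find_matchings
  rw [PySem.List.foldl_append_singleton_eq_map]
  have hn : PySem.Str.len s = (s.toList.length : Int) := by simp [PySem.Str.len_eq]
  rw [hn, PySem.List.pyRange_one]
  have hl : ((s.toList.length : Int) - 1).toNat = s.toList.length - 1 := by omega
  rw [hl, List.map_map]
  apply List.map_congr_left
  intro k hk
  have hk' : k < s.toList.length - 1 := List.mem_range.mp hk
  have h1 : (1 : Int) + (k : Int) = ((k + 1 : Nat) : Int) := by push_cast; ring
  simp only [Function.comp_def, h1]
  rw [show ((0:Int)) = ((0 : Nat) : Int) by simp] at *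
  have h2 := innerA_inv s.toList (s.toList.length - (k+1)) 0 (k+1) ((0:Nat):Int) (by omega) (by omega) (by omega)
  rw [h2]
  simp

lemma diffs_mem_bounds (n : Nat) (d : Int) :
    ∀ ps : List Int, ps.Pairwise (· < ·) → (∀ p ∈ ps, 0 ≤ p ∧ p < (n : Int)) →
      d ∈ diffsRec ps → 1 ≤ d ∧ d < (n : Int) := by
  intro ps
  induction ps with
  | nil => intro _ _ h; simp [diffsRec] at h
  | cons x xs ih =>
      intro hpw hb hd
      simp only [diffsRec, List.mem_append, List.mem_map] at hd
      rcases hd with ⟨q, hq, rfl⟩ | hd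
      · have hxq : x < q := (List.pairwise_cons.mp hpw).1 q hq
        have h1 := hb x (by simp)
        have h2 := hb q (by simp [hq])
        omega
      · exact ih (List.pairwise_cons.mp hpw).2 (fun p hp => hb p (by simp [hp])) hd

lemma diffs_count (d : Int) (hd : 0 < d) :
    ∀ ps : List Int, ps.Pairwise (· < ·) →
      (diffsRec ps).count d = ps.countP (fun p => decide ((p + d) ∈ ps)) := by
  intro ps
  induction ps with
  | nil => simp [diffsRec]
  | cons x xs ih =>
      intro hpw
      obtain ⟨hx, hxs⟩ := List.pairwise_cons.mp hpw
      have hnd : xs.Nodup := hxs.imp (fun h => ne_of_lt h)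
      simp only [diffsRec, List.count_append]
      have hmap : (xs.map (· - x)).count d = if (x + d) ∈ xs then 1 else 0 := by
        rw [List.count_eq_countP, List.countP_map]
        have hcongr : xs.countP ((fun a => a == d) ∘ (· - x)) = xs.countP (fun a => a == (x + d)) := by
          apply List.countP_congr
          intro q _
          simp only [Function.comp_def, beq_iff_eq]
          omega
        rw [hcongr, ← List.count_eq_countP]
        by_cases hmem : (x + d) ∈ xs
        · rw [if_pos hmem]; exact List.count_eq_one_of_mem hnd hmem
        · rw [if_neg hmem]; exact List.count_eq_zero_of_not_mem hmem
      rw [hmap, ih hxs]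
      have hhead : (decide ((x + d) ∈ (x :: xs)) : Bool) = decide ((x + d) ∈ xs) := by
        simp
        intro h; omega
      have htail : xs.countP (fun p => decide ((p + d) ∈ (x :: xs))) = xs.countP (fun p => decide ((p + d) ∈ xs)) := by
        apply List.countP_congr
        intro p hp
        have hxp : x < p := hx p hp
        simp
        intro h; omega
      rw [List.countP_cons, hhead, htail]
      split_ifs <;> (simp_all; try omega)

-- the dict of Source B's grouping loop, as a named object
def bdict (cs : List Char) : PySem.Dict Char (List Int) :=
  (PySem.List.enumerate cs 0).foldl
    (fun d p => d.modify p.2 [] (fun l => l ++ [p.1])) PySem.Dict.empty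

lemma bdict_eq_swapped (cs : List Char) :
    bdict cs = ((PySem.List.enumerate cs 0).map Prod.swap).foldl
      (fun d p => d.modify p.1 [] (fun l => l ++ [p.2])) PySem.Dict.empty := by
  rw [List.foldl_map]; rfl

lemma bdict_keys (cs : List Char) : (bdict cs).keys = PySem.List.dedup cs := by
  rw [bdict_eq_swapped]
  refine Eq.trans (PySem.Dict.keys_foldl_modify_key ((PySem.List.enumerate cs 0).map Prod.swap)
    (fun p => p.1) [] (fun _ p => (fun l => l ++ [p.2])) PySem.Dict.empty) ?_
  have h1 : ((PySem.List.enumerate cs 0).map Prod.swap).map (fun p => p.1)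
      = (PySem.List.enumerate cs 0).map (fun p => p.2) := by
    simp [List.map_map, Function.comp_def, Prod.swap]
  rw [h1]
  have h2 : (PySem.List.enumerate cs 0).map (fun p => p.2) = cs := PySem.List.map_snd_enumerate cs 0
  rw [h2, PySem.List.dedup_eq_ofList]
  rfl

lemma bdict_getD (cs : List Char) (c : Char) : (bdict cs).getD c [] = posL cs c := by
  rw [bdict_eq_swapped, PySem.Dict.getD_foldl_modify_append]
  have he : PySem.List.enumerate cs 0
      = (PySem.List.pyRange 0 (PySem.List.len cs) 1).map (fun j => (j, PySem.List.pyGetD cs j default)) :=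
    PySem.List.enumerate_eq_map_pyRange cs default
  rw [he]
  simp only [List.map_map, PySem.List.len_eq, Function.comp_def, Prod.swap]
  rw [show ((cs.length : Int)) = ((cs.length : Nat) : Int) from rfl, PySem.List.pyRange_zero_nat]
  simp only [List.map_map, Function.comp_def, List.filter_map, PySem.Dict.getD_empty]
  unfold posL
  simp

lemma bdict_values (cs : List Char) :
    (bdict cs).values = (PySem.List.dedup cs).map (fun c => posL cs c) := by
  rw [PySem.Dict.values_eq_map_keys (bdict cs) (by rw [bdict_keys]; exact PySem.List.nodup_dedup cs) []]
  rw [bdict_keys]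
  exact List.map_congr_left (fun c _ => bdict_getD cs c)

-- histogram loop: counts[k] grows by the multiplicity of k
lemma hist (D : List Int) : ∀ (C : List Int), (∀ d ∈ D, 0 ≤ d ∧ d < (C.length : Int)) →
    (D.foldl (fun c d => PySem.List.pySetD c d (PySem.List.pyGetD c d 0 + 1)) C).length = C.length ∧
    ∀ k : Nat, k < C.length →
      (D.foldl (fun c d => PySem.List.pySetD c d (PySem.List.pyGetD c d 0 + 1)) C).getD k 0
        = C.getD k 0 + D.count (k : Int) := by
  induction D with
  | nil => intro C _; simp
  | cons d D ih =>
      intro C hb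
      obtain ⟨hd0, hdlt⟩ := hb d (by simp)
      have hset : PySem.List.pySetD C d (PySem.List.pyGetD C d 0 + 1)
          = C.set d.toNat (C.getD d.toNat 0 + 1) := by
        rw [PySem.List.pySetD_of_nonneg _ _ hd0, PySem.List.pyGetD_eq_getElem _ _ hd0 hdlt]
        congr 1
        rw [List.getD_eq_getElem _ _ (by omega)]
      simp only [List.foldl_cons, hset]
      have hlen : (C.set d.toNat (C.getD d.toNat 0 + 1)).length = C.length := by simp
      obtain ⟨ih1, ih2⟩ := ih (C.set d.toNat (C.getD d.toNat 0 + 1))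
        (fun e he => by have := hb e (by simp [he]); omega)
      refine ⟨by rw [ih1, hlen], ?_⟩
      intro k hk
      rw [ih2 k (by rw [hlen]; exact hk)]
      have hcnt : (d :: D).count (k : Int) = D.count (k : Int) + (if d = (k : Int) then 1 else 0) := by
        rw [List.count_cons]; simp
      rw [hcnt]
      have hgd : (C.set d.toNat (C.getD d.toNat 0 + 1)).getD k 0
          = if d.toNat = k then C.getD d.toNat 0 + 1 else C.getD k 0 := by
        by_cases h : d.toNat = k
        · subst h
          rw [if_pos rfl, List.getD_eq_getElem _ _ (by simpa using hk),
              List.getElem_set_self (by simpa using hk)]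
        · rw [if_neg h, List.getD_eq_getElem _ _ (by simpa using hk),
              List.getElem_set_ne (by simpa using h), List.getD_eq_getElem _ _ hk]
      rw [hgd]
      by_cases hdk : d = (k : Int)
      · have hdt : d.toNat = k := by omega
        rw [if_pos hdt, if_pos hdk, hdt]
        push_cast; ring
      · have hdt : d.toNat ≠ k := by omega
        rw [if_neg hdt, if_neg hdk]
        push_cast; ring

lemma countP_posL (cs : List Char) (c : Char) (δ : Nat) :
    (posL cs c).countP (fun p => decide ((p + (δ : Int)) ∈ posL cs c)) =
      (List.range cs.length).countP
        (fun j => decide (j + δ < cs.length ∧ cs.getD (j + δ) default = c) && (cs.getD j default == c)) := by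
  unfold posL
  rw [List.countP_map, List.countP_filter]
  apply List.countP_congr
  intro j hj
  have hmem : ((j : Int) + (δ : Int)) ∈ posL cs c ↔ (j + δ < cs.length ∧ cs.getD (j + δ) default = c) := by
    rw [mem_posL]
    constructor
    · rintro ⟨j', hj', hc, he⟩
      have : j + δ = j' := by exact_mod_cast he
      subst this; exact ⟨hj', hc⟩
    · rintro ⟨h1, h2⟩; exact ⟨j + δ, h1, h2, by push_cast; ring⟩
  unfold posL at hmem
  simp only [Function.comp_def]
  rw [decide_eq_decide.mpr hmem]

lemma sum_if_single {v : Nat} (a : Char) : ∀ (K : List Char), K.Nodup → a ∈ K →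
    (K.map (fun c => if c = a then v else 0)).sum = v := by
  intro K
  induction K with
  | nil => simp
  | cons x K ih =>
      intro hnd hm
      obtain ⟨hx, hnd'⟩ := List.nodup_cons.mp hnd
      simp only [List.map_cons, List.sum_cons]
      by_cases hxa : x = a
      · subst hxa
        have hz : ∀ c ∈ K, (if c = x then v else 0) = 0 := by
          intro c hc
          exact if_neg (by rintro rfl; exact hx hc)
        rw [if_pos rfl, List.map_congr_left hz]
        simp
      · rw [if_neg hxa, ih hnd' ((List.mem_cons.mp hm).resolve_left (fun h => hxa h.symm))]
        simp

lemma sum_countP (cs : List Char) (δ : Nat) (K : List Char) (hnd : K.Nodup)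
    (hcov : ∀ j, j < cs.length → cs.getD j default ∈ K) :
    ∀ (l : List Nat), (∀ j ∈ l, j < cs.length) →
    (K.map (fun c => l.countP
        (fun j => decide (j + δ < cs.length ∧ cs.getD (j + δ) default = c) && (cs.getD j default == c)))).sum
      = l.countP (fun j => decide (j + δ < cs.length ∧ cs.getD j default = cs.getD (j + δ) default)) := by
  intro l
  induction l with
  | nil => simp
  | cons j l ih =>
      intro hl
      have hj : j < cs.length := hl j (by simp)
      simp only [List.countP_cons]
      have hsplit : (K.map (fun c => l.countP
          (fun j => decide (j + δ < cs.length ∧ cs.getD (j + δ) default = c) && (cs.getD j default == c))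
          + (if (decide (j + δ < cs.length ∧ cs.getD (j + δ) default = c) && (cs.getD j default == c)) = true then 1 else 0))).sum
          = (K.map (fun c => l.countP
            (fun j => decide (j + δ < cs.length ∧ cs.getD (j + δ) default = c) && (cs.getD j default == c)))).sum
          + (K.map (fun c => if (decide (j + δ < cs.length ∧ cs.getD (j + δ) default = c) && (cs.getD j default == c)) = true then 1 else 0)).sum :=
        List.sum_map_add
      rw [hsplit, ih (fun j' hj' => hl j' (by simp [hj']))]
      congr 1
      have hone : ∀ c ∈ K, (if (decide (j + δ < cs.length ∧ cs.getD (j + δ) default = c) && (cs.getD j default == c)) = true then 1 else 0)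
          = if c = cs.getD j default then (if j + δ < cs.length ∧ cs.getD (j + δ) default = cs.getD j default then 1 else 0) else 0 := by
        intro c _
        by_cases hca : c = cs.getD j default
        · subst hca
          rw [if_pos rfl]
          simp only [beq_self_eq_true, Bool.and_true, decide_eq_true_eq]
        · rw [if_neg hca]
          have hb : (cs.getD j default == c) = false := beq_eq_false_iff_ne.mpr (fun h => hca h.symm)
          rw [hb, Bool.and_false]
          simp
      rw [List.map_congr_left hone, sum_if_single (cs.getD j default) K hnd (hcov j hj)]
      have hiff : (j + δ < cs.length ∧ cs.getD (j + δ) default = cs.getD j default)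
          ↔ (j + δ < cs.length ∧ cs.getD j default = cs.getD (j + δ) default) :=
        and_congr_right (fun _ => eq_comm)
      simp only [decide_eq_true_eq]
      exact if_congr hiff rfl rfl

lemma countP_restrict (cs : List Char) (δ : Nat) (hδ : 1 ≤ δ) :
    (List.range cs.length).countP
        (fun j => decide (j + δ < cs.length ∧ cs.getD j default = cs.getD (j + δ) default))
      = cnt cs 0 δ (cs.length - δ) := by
  by_cases hle : δ ≤ cs.length
  · rw [show cs.length = (cs.length - δ) + δ by omega, List.range_add, List.countP_append]
    have h2 : ((List.range δ).map (fun x => (cs.length - δ) + x)).countP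
        (fun j => decide (j + δ < (cs.length - δ) + δ ∧ cs.getD j default = cs.getD (j + δ) default)) = 0 := by
      rw [List.countP_eq_zero]
      intro j hj
      simp only [List.mem_map] at hj
      obtain ⟨x, hx, rfl⟩ := hj
      simp only [decide_eq_true_eq]
      rintro ⟨h1, -⟩
      omega
    rw [h2, Nat.add_zero]
    unfold cnt
    simp only [Nat.add_sub_cancel]
    apply List.countP_congr
    intro j hj
    have hjlt : j < cs.length - δ := List.mem_range.mp hj
    simp only [decide_eq_true_eq]
    have hj1 : j < cs.length := by omega
    have hj2 : j + δ < cs.length := by omega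
    rw [List.getD_eq_getElem?_getD, List.getD_eq_getElem?_getD,
        List.getElem?_eq_getElem hj1, List.getElem?_eq_getElem hj2]
    constructor
    · rintro ⟨-, h⟩
      rw [Nat.zero_add, List.getElem?_eq_getElem hj1, show δ + j = j + δ by omega,
          List.getElem?_eq_getElem hj2]
      simpa using h
    · intro h
      rw [Nat.zero_add, List.getElem?_eq_getElem hj1, show δ + j = j + δ by omega,
          List.getElem?_eq_getElem hj2] at h
      exact ⟨by omega, by simpa using h⟩
  · have h0 : cs.length - δ = 0 := by omega
    rw [h0]
    have : (List.range cs.length).countP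
        (fun j => decide (j + δ < cs.length ∧ cs.getD j default = cs.getD (j + δ) default)) = 0 := by
      rw [List.countP_eq_zero]
      intro j hj
      simp only [decide_eq_true_eq]
      rintro ⟨h1, -⟩
      omega
    rw [this]
    simp [cnt]

lemma B_eq (s : String) :
    find_matchings_alt s =
      (List.range (s.toList.length - 1)).map
        (fun k => ((cnt s.toList 0 (k + 1) (s.toList.length - (k + 1)) : Nat) : Int)) := by
  set cs := s.toList with hcs
  set n := cs.length with hn
  have hBdef : find_matchings_alt s = PySem.List.slice
      ((bdict cs).values.foldl (fun c ps =>
        (pairDiffs [] ps).foldl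
          (fun c d => PySem.List.pySetD c d (PySem.List.pyGetD c d 0 + 1)) c)
        (PySem.List.pyRepeat [0] (PySem.Str.len s))) (some 1) none := rfl
  rw [hBdef]
  have hlen : PySem.Str.len s = (n : Int) := by
    rw [PySem.Str.len_eq, hn, hcs]
  rw [hlen, PySem.List.pyRepeat_singleton]
  have hrep : ((n : Int)).toNat = n := by omega
  rw [hrep]
  have hpd : ∀ (C : List Int), (bdict cs).values.foldl (fun c ps =>
      (pairDiffs [] ps).foldl
        (fun c d => PySem.List.pySetD c d (PySem.List.pyGetD c d 0 + 1)) c) C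
      = ((bdict cs).values.flatMap diffsRec).foldl
        (fun c d => PySem.List.pySetD c d (PySem.List.pyGetD c d 0 + 1)) C := by
    intro C
    have hfun : (fun (c : List Int) (ps : List Int) => (pairDiffs [] ps).foldl
        (fun c d => PySem.List.pySetD c d (PySem.List.pyGetD c d 0 + 1)) c)
        = (fun c ps => (diffsRec ps).foldl
        (fun c d => PySem.List.pySetD c d (PySem.List.pyGetD c d 0 + 1)) c) := by
      funext c ps
      rw [pairDiffs_eq ps []]
      rfl
    rw [hfun]
    exact (List.foldl_flatMap).symm
  rw [hpd]
  set D := ((bdict cs).values.flatMap diffsRec) with hD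
  have hbounds : ∀ d ∈ D, 1 ≤ d ∧ d < (n : Int) := by
    intro d hd
    rw [hD, List.mem_flatMap] at hd
    obtain ⟨ps, hps, hdps⟩ := hd
    rw [bdict_values] at hps
    obtain ⟨c, -, rfl⟩ := List.mem_map.mp hps
    refine diffs_mem_bounds n d (posL cs c) (posL_pairwise cs c) ?_ hdps
    intro p hp
    obtain ⟨j, hj, -, rfl⟩ := (mem_posL cs c p).mp hp
    constructor <;> [positivity; exact_mod_cast hj]
  obtain ⟨hlenC, hget⟩ := hist D (List.replicate n (0:Int))
    (fun d hd => by have := hbounds d hd; simp; omega)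
  have hlenC' : (D.foldl (fun c d => PySem.List.pySetD c d (PySem.List.pyGetD c d 0 + 1))
      (List.replicate n (0:Int))).length = n := by simpa using hlenC
  rw [PySem.List.slice_from_one]
  apply List.ext_getElem
  · simp [hlenC]
  · intro k hk1 hk2
    have hkn : k < n - 1 := by simpa [hlenC] using hk1
    have hfold : (D.foldl (fun c d => PySem.List.pySetD c d (PySem.List.pyGetD c d 0 + 1))
        (List.replicate n (0:Int))).tail.length = n - 1 := by rw [List.length_tail]; omega
    rw [List.getElem_tail]
    have hgetk := hget (k + 1) (by simp; omega)
    rw [List.getD_eq_getElem _ _ (by rw [hlenC]; simp; omega)] at hgetk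
    rw [hgetk]
    have hcount : D.count (((k+1 : Nat) : Int)) = cnt cs 0 (k+1) (n - (k+1)) := by
      rw [hD, bdict_values, List.flatMap_map, List.count_flatMap]
      have hper : ∀ c ∈ PySem.List.dedup cs,
          ((List.count (((k+1 : Nat) : Int)) ∘ fun c => diffsRec (posL cs c)) c)
            = (List.range n).countP
              (fun j => decide (j + (k+1) < cs.length ∧ cs.getD (j + (k+1)) default = c) && (cs.getD j default == c)) := by
        intro c _
        simp only [Function.comp_def]
        rw [diffs_count _ (by positivity) _ (posL_pairwise cs c), countP_posL cs c (k+1)]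
      rw [List.map_congr_left hper]
      rw [sum_countP cs (k+1) (PySem.List.dedup cs) (PySem.List.nodup_dedup cs)
        (fun j hj => (PySem.List.mem_dedup _ _).mpr (by
          rw [List.getD_eq_getElem _ _ (by omega)]
          exact List.getElem_mem _))
        (List.range n) (fun j hj => List.mem_range.mp hj)]
      exact countP_restrict cs (k+1) (by omega)
    rw [hcount]
    have hL : (List.replicate n (0:Int)).getD (k+1) 0 = 0 := by
      rcases Nat.lt_or_ge (k+1) n with h | h
      · rw [List.getD_eq_getElem _ _ (by simpa using h)]; simp
      · rw [List.getD_eq_default _ _ (by simpa using h)]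
    rw [hL]
    rw [List.getElem_map, List.getElem_range]
    simp

-- ===== VERDICT (by name: the statement is the Claim_ definition above) =====
theorem find_matchings_spec : Claim_equal_find_matchings := by
  intro s _
  unfold Spec_find_matchings
  rw [A_eq, B_eq]
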